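-- pv_equiv track=rewrite | github.com/urielT12/Next.py-course | lesson3-Exceptions.py | pass_check
-- ===== SOURCE A (Python) =====
-- import string
--
-- def pass_check(password):
--     """a function that I add for convenience, returns for a password which char is it missing"""
--     upper = False
--     lower = False
--     number = False
--     punctuation = False
--     for char in password:
--         if char.isupper():
--             upper = True
--         elif char.islower():
--             lower = True
--         elif char.isdigit():
--             number = True
--         elif char in string.punctuation:
--             punctuation = True
--     if not upper:
--         return "upper"
--     elif not lower:
--         return "lower"
--     elif not number:
--         return "number"
--     elif not punctuation:
--         return "punctuation"
-- ===== SOURCE B (Python) =====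
-- import string
--
-- def pass_check(password):
--     """a function that I add for convenience, returns for a password which char is it missing"""
--     if not any(c.isupper() for c in password):
--         return "upper"
--     if not any(c.islower() for c in password):
--         return "lower"
--     if not any(c.isdigit() for c in password):
--         return "number"
--     if not any(c in string.punctuation for c in password):
--         return "punctuation"
--     return None
-- ===== Notes on version B (the rewrite author's own statement) =====
-- stated objective: idiomatic
-- what changed: Replaces A's single fused pass maintaining four boolean flags with up to four independent short-circuiting any() scans, one per character class, returning at the first missing class.
import Mathlib
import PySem

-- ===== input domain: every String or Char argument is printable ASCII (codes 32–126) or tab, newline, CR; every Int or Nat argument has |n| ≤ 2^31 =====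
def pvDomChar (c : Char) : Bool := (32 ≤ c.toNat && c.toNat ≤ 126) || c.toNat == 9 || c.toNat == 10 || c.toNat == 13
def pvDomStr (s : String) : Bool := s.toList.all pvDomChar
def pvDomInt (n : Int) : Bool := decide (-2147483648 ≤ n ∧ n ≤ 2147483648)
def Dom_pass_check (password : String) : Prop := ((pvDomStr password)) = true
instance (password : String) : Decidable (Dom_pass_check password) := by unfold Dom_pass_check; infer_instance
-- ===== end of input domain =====

-- B replaces A's single fused flag-accumulating pass with four independent short-circuiting scans (idiomatic; same O(n) cost).

-- Per-character class tests, exact for Python's c.isupper()/islower()/isdigit() on the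
-- printable-ASCII+whitespace domain Dom_pass_check, stated by ASCII code range.
def chIsUpper (c : Char) : Bool := 65 ≤ c.toNat && c.toNat ≤ 90
def chIsLower (c : Char) : Bool := 97 ≤ c.toNat && c.toNat ≤ 122
def chIsDigit (c : Char) : Bool := 48 ≤ c.toNat && c.toNat ≤ 57
-- 'c in string.punctuation': the 32 ASCII punctuation characters, by their code ranges
-- (codes 33–47, 58–64, 91–96, 123–126); exact for every char since all of string.punctuation is ASCII.
def chIsPunct (c : Char) : Bool :=
  (33 ≤ c.toNat && c.toNat ≤ 47) || (58 ≤ c.toNat && c.toNat ≤ 64) ||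
  (91 ≤ c.toNat && c.toNat ≤ 96) || (123 ≤ c.toNat && c.toNat ≤ 126)

-- ===== PORT A =====
-- A's loop body: the if/elif chain updating the four flags (upper, lower, number, punctuation).
def passStep (s : Bool × Bool × Bool × Bool) (c : Char) : Bool × Bool × Bool × Bool :=
  if chIsUpper c then (true, s.2.1, s.2.2.1, s.2.2.2)
  else if chIsLower c then (s.1, true, s.2.2.1, s.2.2.2)
  else if chIsDigit c then (s.1, s.2.1, true, s.2.2.2)
  else if chIsPunct c then (s.1, s.2.1, s.2.2.1, true)
  else s

def pass_check (password : String) : Option String :=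
  let st := password.toList.foldl passStep (false, false, false, false)
  if !st.1 then some "upper"
  else if !st.2.1 then some "lower"
  else if !st.2.2.1 then some "number"
  else if !st.2.2.2 then some "punctuation"
  else none

-- ===== PORT B =====
def pass_check_alt (password : String) : Option String :=
  if !password.toList.any chIsUpper then some "upper"
  else if !password.toList.any chIsLower then some "lower"
  else if !password.toList.any chIsDigit then some "number"
  else if !password.toList.any chIsPunct then some "punctuation"
  else none

-- ===== PRECONDITION & SPEC =====
def Spec_pass_check (password : String) (out : Option String) : Prop := out = pass_check_alt password
instance (password : String) (out : Option String) : Decidable (Spec_pass_check password out) := by unfold Spec_pass_check; infer_instance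

-- ===== CLAIM (what is proved, stated in full; the proofs are below) =====
def Claim_equal_pass_check : Prop := ∀ (password : String), Dom_pass_check password → Spec_pass_check password (pass_check password)

-- ===== LEMMAS AND PROOFS =====

-- The four class tests are pairwise disjoint (the ASCII code ranges do not overlap).
lemma upper_not_lower {c : Char} (h : chIsUpper c = true) : chIsLower c = false := by
  simp [chIsUpper] at h; simp [chIsLower]; omega
lemma upper_not_digit {c : Char} (h : chIsUpper c = true) : chIsDigit c = false := by
  simp [chIsUpper] at h; simp [chIsDigit]; omega
lemma upper_not_punct {c : Char} (h : chIsUpper c = true) : chIsPunct c = false := by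
  simp [chIsUpper] at h; simp [chIsPunct]; omega
lemma lower_not_digit {c : Char} (h : chIsLower c = true) : chIsDigit c = false := by
  simp [chIsLower] at h; simp [chIsDigit]; omega
lemma lower_not_punct {c : Char} (h : chIsLower c = true) : chIsPunct c = false := by
  simp [chIsLower] at h; simp [chIsPunct]; omega
lemma digit_not_punct {c : Char} (h : chIsDigit c = true) : chIsPunct c = false := by
  simp [chIsDigit] at h; simp [chIsPunct]; omega

-- Invariant of A's loop: each flag ends up as (initial value) || (some char of the rest is in that class).
lemma foldl_passStep (xs : List Char) (u l n p : Bool) :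
    xs.foldl passStep (u, l, n, p) =
      (u || xs.any chIsUpper, l || xs.any chIsLower, n || xs.any chIsDigit, p || xs.any chIsPunct) := by
  induction xs generalizing u l n p with
  | nil => simp
  | cons c xs ih =>
    by_cases h1 : chIsUpper c
    · simp [passStep, h1, ih, upper_not_lower h1, upper_not_digit h1, upper_not_punct h1]
    · by_cases h2 : chIsLower c
      · simp [passStep, h1, h2, ih, lower_not_digit h2, lower_not_punct h2]
      · by_cases h3 : chIsDigit c
        · simp [passStep, h1, h2, h3, ih, digit_not_punct h3]
        · by_cases h4 : chIsPunct c <;> simp [passStep, h1, h2, h3, h4, ih]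

-- ===== VERDICT (by name: the statement is the Claim_ definition above) =====
theorem pass_check_spec : Claim_equal_pass_check := by
  intro password _
  unfold Spec_pass_check pass_check pass_check_alt
  rw [foldl_passStep]
  simp
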